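-- pv_equiv track=rewrite | github.com/Kae-Desu/LazyEASM | modules/Wappalyzer.py | extract_web_server
-- ===== SOURCE A (Python) =====
-- from typing import List, Dict, Optional, Tuple
--
-- def extract_web_server(technologies: Dict) -> Optional[str]:
--     """
--     Extract web server from technologies.
--
--     Args:
--         technologies: Wappalyzer output dict
--
--     Returns:
--         Web server name or None
--     """
--     web_server_techs = ['nginx', 'Apache', 'Apache HTTP Server', 'IIS',
--                        'lighttpd', 'OpenResty', 'LiteSpeed']
--
--     for tech_name in technologies.keys():
--         if tech_name in web_server_techs:
--             return tech_name
--
--     categories = ['Web servers', 'Reverse proxies']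
--     for tech_name, tech_data in technologies.items():
--         tech_cats = tech_data.get('categories', [])
--         for cat in categories:
--             if cat in tech_cats:
--                 return tech_name
--
--     return None
-- ===== SOURCE B (Python) =====
-- def extract_web_server(technologies):
--     """One pass over items: record the first name match and the first category match, then merge."""
--     web_server_set = {'nginx', 'Apache', 'Apache HTTP Server', 'IIS',
--                       'lighttpd', 'OpenResty', 'LiteSpeed'}
--     cat_set = {'Web servers', 'Reverse proxies'}
--     first_name = None
--     first_cat = None
--     for tech_name, tech_data in technologies.items():
--         if first_name is None and tech_name in web_server_set:
--             first_name = tech_name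
--         if first_cat is None and any(c in cat_set for c in tech_data.get('categories', [])):
--             first_cat = tech_name
--     return first_name if first_name is not None else first_cat
-- ===== Notes on version B (the rewrite author's own statement) =====
-- stated objective: alternative
-- what changed: Replaces A's two sequential scans (name pass, then category pass) with a single pass over items() maintaining first-name-match and first-category-match slots, merged after the loop.
import Mathlib
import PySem

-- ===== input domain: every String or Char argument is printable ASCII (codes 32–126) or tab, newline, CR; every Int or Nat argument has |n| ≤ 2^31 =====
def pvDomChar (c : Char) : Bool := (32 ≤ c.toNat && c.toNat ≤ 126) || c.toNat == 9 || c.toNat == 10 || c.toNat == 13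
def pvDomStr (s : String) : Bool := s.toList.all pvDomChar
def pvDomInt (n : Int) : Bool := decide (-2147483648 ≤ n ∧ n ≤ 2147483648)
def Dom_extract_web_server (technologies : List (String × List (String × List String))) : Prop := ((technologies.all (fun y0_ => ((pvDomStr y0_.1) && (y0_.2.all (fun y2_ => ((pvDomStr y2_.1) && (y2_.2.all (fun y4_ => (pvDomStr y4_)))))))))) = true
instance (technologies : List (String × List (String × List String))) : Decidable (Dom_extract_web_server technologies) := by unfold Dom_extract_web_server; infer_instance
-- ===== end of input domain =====

-- B merges A's two scans (name pass, then category pass) into one pass with two slots; alternative decomposition, same cost.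
-- ===== PORT A =====
def pvWebServerTechs : List String :=
  ["nginx", "Apache", "Apache HTTP Server", "IIS", "lighttpd", "OpenResty", "LiteSpeed"]

def pvCategories : List String := ["Web servers", "Reverse proxies"]

-- first loop of A: over keys, return first name in web_server_techs
def pvFindName : List (String × List (String × List String)) → Option String
  | [] => none
  | (tech_name, _) :: rest =>
      if pvWebServerTechs.contains tech_name then some tech_name else pvFindName rest

-- inner loop of A: for cat in categories: if cat in tech_cats: return
def pvCatHit (tech_cats : List String) : Bool :=
  pvCategories.any (fun cat => tech_cats.contains cat)

-- second loop of A: over items, return first with a category hit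
def pvFindCat : List (String × List (String × List String)) → Option String
  | [] => none
  | (tech_name, tech_data) :: rest =>
      let tech_cats := PySem.Dict.getD (PySem.Dict.mk tech_data) "categories" []
      if pvCatHit tech_cats then some tech_name else pvFindCat rest

def extract_web_server (technologies : List (String × List (String × List String))) : Option String :=
  match pvFindName technologies with
  | some tech_name => some tech_name
  | none => pvFindCat technologies

-- ===== PORT B =====
def pvWebServerSet : PySem.Set String :=
  PySem.Set.ofList ["nginx", "Apache", "Apache HTTP Server", "IIS", "lighttpd", "OpenResty", "LiteSpeed"]

def pvCatSet : PySem.Set String := PySem.Set.ofList ["Web servers", "Reverse proxies"]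

-- single pass keeping (first_name, first_cat), each slot set at most once
def pvStep (acc : Option String × Option String) (item : String × List (String × List String)) :
    Option String × Option String :=
  let first_name :=
    if acc.1.isNone && pvWebServerSet.contains item.1 then some item.1 else acc.1
  let first_cat :=
    if acc.2.isNone &&
        (PySem.Dict.getD (PySem.Dict.mk item.2) "categories" []).any (fun c => pvCatSet.contains c) then
      some item.1
    else acc.2
  (first_name, first_cat)

def extract_web_server_alt (technologies : List (String × List (String × List String))) : Option String :=
  let r := technologies.foldl pvStep (none, none)
  match r.1 with
  | some n => some n
  | none => r.2

-- ===== PRECONDITION & SPEC =====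
def Spec_extract_web_server (technologies : List (String × List (String × List String))) (out : Option String) : Prop := out = extract_web_server_alt technologies
instance (technologies : List (String × List (String × List String))) (out : Option String) : Decidable (Spec_extract_web_server technologies out) := by unfold Spec_extract_web_server; infer_instance

-- ===== CLAIM (what is proved, stated in full; the proofs are below) =====
def Claim_equal_extract_web_server : Prop := ∀ (technologies : List (String × List (String × List String))), Dom_extract_web_server technologies → Spec_extract_web_server technologies (extract_web_server technologies)

-- ===== LEMMAS AND PROOFS =====

-- ===== VERDICT (by name: the statement is the Claim_ definition above) =====
-- the two membership tests agree
lemma pvName_iff (n : String) : n ∈ pvWebServerSet ↔ n ∈ pvWebServerTechs := by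
  simp [pvWebServerSet, pvWebServerTechs, PySem.Set.ofList]

lemma pvCat_iff (cats : List String) :
    (∃ x ∈ cats, x ∈ pvCatSet) ↔ pvCatHit cats = true := by
  simp [pvCatHit, pvCatSet, pvCategories, PySem.Set.ofList]
  aesop

lemma pvOr_ite (c : Bool) (n : String) (r : Option String) :
    (if c then some n else none).or r = if c then some n else r := by
  cases c <;> simp

-- fold invariant: the fold from any accumulator is the accumulator's slots, else the scans' results
lemma pvFold_inv (t : List (String × List (String × List String)))
    (a b : Option String) :
    t.foldl pvStep (a, b) = (a.or (pvFindName t), b.or (pvFindCat t)) := by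
  induction t generalizing a b with
  | nil => simp [pvFindName, pvFindCat]
  | cons x rest ih =>
      obtain ⟨n, d⟩ := x
      have hstep : pvStep (a, b) (n, d) =
          (a.or (if pvWebServerTechs.contains n then some n else none),
           b.or (if pvCatHit (PySem.Dict.getD (PySem.Dict.mk d) "categories" []) then
                   some n else none)) := by
        cases a <;> cases b <;>
          simp [pvStep, pvName_iff, pvCat_iff, Option.some_or, Option.none_or]
      simp only [List.foldl_cons, hstep, ih, Option.or_assoc, pvOr_ite]
      rfl

theorem extract_web_server_spec : Claim_equal_extract_web_server := by
  intro t _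
  unfold Spec_extract_web_server extract_web_server extract_web_server_alt
  rw [pvFold_inv t none none]
  cases h : pvFindName t <;> simp [Option.or]
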